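-- pv_equiv track=rewrite | github.com/holylovenia/Seleksi-1-Asisten-LabPro-2018 | 5-Problem12.py | findsize
-- ===== SOURCE A (Python) =====
-- def findsize(contour,size):
-- 	dp_matrix = []
-- 	for i in range(0,size):
-- 		dp_matrix.append([])
--
-- 	max_size = 0
--
-- 	for i in range(0,size):
-- 		for j in range(0,size):
-- 			if i == 0 or j == 0:
-- 				dp_matrix[i].append(1)
-- 			else:
-- 				if contour[i][j] == contour[i-1][j] == contour[i][j-1] == contour[i-1][j-1]:
-- 					dp_matrix[i].append(min(min(dp_matrix[i][j-1], dp_matrix[i-1][j]), dp_matrix[i-1][j-1]) + 1)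
-- 				else:
-- 					dp_matrix[i].append(1)
--
-- 			max_size = max(max_size, dp_matrix[i][j])
--
-- 	return max_size
-- ===== SOURCE B (Python) =====
-- def findsize(contour, size):
--     if size <= 0:
--         return 0
--     best = 1
--     for i in range(size):
--         for j in range(size):
--             for s in range(2, size + 1):
--                 if i + s <= size and j + s <= size:
--                     if all(contour[i + a][j + b] == contour[i][j]
--                            for a in range(s) for b in range(s)):
--                         best = max(best, s)
--     return best
-- ===== Notes on version B (the rewrite author's own statement) =====
-- stated objective: alternative
-- what changed: Replaces the min-of-three-neighbours DP table with a direct brute-force search that, for every top-left corner and side length, checks whether the whole square block holds one single value.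
import Mathlib
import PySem

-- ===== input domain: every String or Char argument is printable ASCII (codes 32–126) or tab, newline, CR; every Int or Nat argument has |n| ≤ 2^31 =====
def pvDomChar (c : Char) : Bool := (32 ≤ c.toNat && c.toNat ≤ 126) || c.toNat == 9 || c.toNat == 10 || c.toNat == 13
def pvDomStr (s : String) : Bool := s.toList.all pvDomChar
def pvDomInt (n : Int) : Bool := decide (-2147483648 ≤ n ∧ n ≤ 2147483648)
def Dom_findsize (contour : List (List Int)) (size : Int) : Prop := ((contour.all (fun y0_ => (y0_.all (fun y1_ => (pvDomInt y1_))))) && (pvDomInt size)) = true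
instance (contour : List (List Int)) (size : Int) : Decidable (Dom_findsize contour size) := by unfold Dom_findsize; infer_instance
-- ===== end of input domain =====

-- B replaces A's min-of-three-neighbours DP table with a direct brute-force search over
-- all square blocks (alternative algorithm, same return value; not faster).

-- ===== PORT A =====
-- A-side helper: the body of A's inner loop (one Python j-iteration, acting on the
-- state (dp_matrix, max_size))
def pvBodyA (contour : List (List Int)) (st : List (List Int) × Int) (i j : Int) :
    List (List Int) × Int :=
  let v : Int :=
    if i = 0 ∨ j = 0 then 1
    else
      if PySem.List.pyGetD (PySem.List.pyGetD contour i []) j 0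
           = PySem.List.pyGetD (PySem.List.pyGetD contour (i-1) []) j 0
         ∧ PySem.List.pyGetD (PySem.List.pyGetD contour (i-1) []) j 0
           = PySem.List.pyGetD (PySem.List.pyGetD contour i []) (j-1) 0
         ∧ PySem.List.pyGetD (PySem.List.pyGetD contour i []) (j-1) 0
           = PySem.List.pyGetD (PySem.List.pyGetD contour (i-1) []) (j-1) 0 then
        min (min (PySem.List.pyGetD (PySem.List.pyGetD st.1 i []) (j-1) 0)
                 (PySem.List.pyGetD (PySem.List.pyGetD st.1 (i-1) []) j 0))
            (PySem.List.pyGetD (PySem.List.pyGetD st.1 (i-1) []) (j-1) 0) + 1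
      else 1
  let dp' := PySem.List.pySetD st.1 i (PySem.List.pyGetD st.1 i [] ++ [v])
  (dp', max st.2 (PySem.List.pyGetD (PySem.List.pyGetD dp' i []) j 0))

def findsize (contour : List (List Int)) (size : Int) : Int :=
  let dp0 : List (List Int) :=
    (PySem.List.pyRange 0 size).foldl (fun acc _ => acc ++ [([] : List Int)]) []
  ((PySem.List.pyRange 0 size).foldl (fun st i =>
      (PySem.List.pyRange 0 size).foldl (fun st j => pvBodyA contour st i j) st)
    (dp0, (0 : Int))).2

-- ===== PORT B =====
def findsize_alt (contour : List (List Int)) (size : Int) : Int :=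
  if size ≤ 0 then 0
  else
    (PySem.List.pyRange 0 size).foldl (fun best i =>
      (PySem.List.pyRange 0 size).foldl (fun best j =>
        (PySem.List.pyRange 2 (size + 1)).foldl (fun best s =>
          if i + s ≤ size ∧ j + s ≤ size then
            if (PySem.List.pyRange 0 s).all (fun a =>
                 (PySem.List.pyRange 0 s).all (fun b =>
                   PySem.List.pyGetD (PySem.List.pyGetD contour (i + a) []) (j + b) 0
                     == PySem.List.pyGetD (PySem.List.pyGetD contour i []) j 0))
            then max best s else best
          else best
        ) best
      ) best
    ) 1

-- ===== PRECONDITION & SPEC =====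
-- Pre_: exactly the inputs on which the Python A returns normally.  When size ≥ 2, A
-- indexes every cell of the leading size×size block, so it raises IndexError unless the
-- grid has at least size rows and its first size rows each have length ≥ size; for
-- size ≤ 1 the grid is never indexed and A is total.
def Pre_findsize (contour : List (List Int)) (size : Int) : Prop :=
  2 ≤ size → (size ≤ (contour.length : Int) ∧
    ∀ row ∈ contour.take size.toNat, size ≤ (row.length : Int))
instance (contour : List (List Int)) (size : Int) : Decidable (Pre_findsize contour size) := by
  unfold Pre_findsize; infer_instance

def pvWitness_findsize : List (List Int) × Int := ([[1, 1], [1, 1]], 2)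

def Spec_findsize (contour : List (List Int)) (size : Int) (out : Int) : Prop := out = findsize_alt contour size
instance (contour : List (List Int)) (size : Int) (out : Int) : Decidable (Spec_findsize contour size out) := by unfold Spec_findsize; infer_instance

-- ===== CLAIM (what is proved, stated in full; the proofs are below) =====
def Claim_equal_findsize : Prop := ∀ (contour : List (List Int)) (size : Int), Dom_findsize contour size → Pre_findsize contour size → Spec_findsize contour size (findsize contour size)

-- ===== LEMMAS AND PROOFS =====

-- cell (i, j) of the grid, with the defaults both ports use
def pvG (c : List (List Int)) (i j : Nat) : Int := (c.getD i []).getD j 0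

-- the DP value A's table stores at (i, j)
def pvDp (c : List (List Int)) : Nat → Nat → Nat
  | 0, _ => 1
  | _+1, 0 => 1
  | i+1, j+1 =>
    if pvG c (i+1) (j+1) = pvG c i (j+1) ∧ pvG c i (j+1) = pvG c (i+1) j ∧
       pvG c (i+1) j = pvG c i j then
      min (min (pvDp c (i+1) j) (pvDp c i (j+1))) (pvDp c i j) + 1
    else 1
  termination_by i j => (i, j)

-- the square of side t+1 with bottom-right corner (i, j) is constant
def pvEqto (c : List (List Int)) (i j t : Nat) : Prop :=
  ∀ a b : Nat, a ≤ t → b ≤ t → pvG c (i - a) (j - b) = pvG c i j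

-- the square of side s with top-left corner (i, j) is constant
def pvCond (c : List (List Int)) (i j s : Nat) : Prop :=
  ∀ a b : Nat, a < s → b < s → pvG c (i + a) (j + b) = pvG c i j

def pvRow (c : List (List Int)) (k i : Nat) : List Int :=
  (List.range k).map (fun j => ((pvDp c i j : Nat) : Int))
def pvMat (c : List (List Int)) (n i k : Nat) : List (List Int) :=
  (List.range n).map (fun r => if r < i then pvRow c n r else if r = i then pvRow c k i else [])
def pvRowMax (c : List (List Int)) (m : Int) (i k : Nat) : Int :=
  (List.range k).foldl (fun acc j => max acc ((pvDp c i j : Int))) m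
def pvAMax (c : List (List Int)) (n i : Nat) : Int :=
  (List.range i).foldl (fun acc r => pvRowMax c acc r n) 0

-- B-side proof helper: the innermost (side-length) loop of B
def pvInnerB (c : List (List Int)) (size : Int) (iN jN : Nat) (best : Int) : Int :=
  (PySem.List.pyRange 2 (size + 1)).foldl (fun best s =>
    if (iN : Int) + s ≤ size ∧ (jN : Int) + s ≤ size then
      if (PySem.List.pyRange 0 s).all (fun a =>
           (PySem.List.pyRange 0 s).all (fun b =>
             PySem.List.pyGetD (PySem.List.pyGetD c ((iN : Int) + a) []) ((jN : Int) + b) 0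
               == PySem.List.pyGetD (PySem.List.pyGetD c (iN : Int) []) (jN : Int) 0))
      then max best s else best
    else best) best

-- generic fold lemmas
theorem pv_foldl_ge_init {α β : Type} [Preorder α] (f : α → β → α)
    (h : ∀ a x, a ≤ f a x) (l : List β) (a : α) : a ≤ l.foldl f a := by
  induction l generalizing a with
  | nil => exact le_refl a
  | cons x xs ih => exact le_trans (h a x) (ih (f a x))

theorem pv_foldl_ge_of_mem {α β : Type} [Preorder α] (f : α → β → α)
    (h : ∀ a x, a ≤ f a x) {l : List β} {x : β} (hx : x ∈ l) (g : α)
    (hg : ∀ a, g ≤ f a x) (a : α) : g ≤ l.foldl f a := by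
  induction l generalizing a with
  | nil => cases hx
  | cons y ys ih =>
    rcases List.mem_cons.mp hx with h1 | h2
    · subst h1
      exact le_trans (hg a) (pv_foldl_ge_init f h ys (f a x))
    · exact ih h2 (f a y)

theorem pv_foldl_le_bound {α β : Type} [Preorder α] (f : α → β → α) (B : α)
    {l : List β} (h : ∀ a x, a ≤ B → x ∈ l → f a x ≤ B) {a : α} (ha : a ≤ B) :
    l.foldl f a ≤ B := by
  induction l generalizing a with
  | nil => exact ha
  | cons y ys ih =>
    exact ih (fun a x hax hx => h a x hax (List.mem_cons_of_mem _ hx))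
      (h a y ha (List.mem_cons_self))

theorem pvDp_pos (c : List (List Int)) (i j : Nat) : 1 ≤ pvDp c i j := by
  cases i with
  | zero => simp [pvDp]
  | succ i =>
    cases j with
    | zero => simp [pvDp]
    | succ j => rw [pvDp]; split <;> omega

-- (a) the DP value is witnessed: a constant square of side pvDp ends at (i, j)
theorem pvDp_eqto (c : List (List Int)) (i j : Nat) :
    pvDp c i j - 1 ≤ i ∧ pvDp c i j - 1 ≤ j ∧ pvEqto c i j (pvDp c i j - 1) := by
  induction i, j using pvDp.induct c with
  | case1 j =>
    refine ⟨by simp [pvDp], by simp [pvDp], ?_⟩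
    intro a b ha hb
    simp [pvDp] at ha hb
    simp [ha, hb]
  | case2 i =>
    refine ⟨by simp [pvDp], by simp [pvDp], ?_⟩
    intro a b ha hb
    simp [pvDp] at ha hb
    simp [ha, hb]
  | case3 i j hcond ih1 ih2 ih3 =>
    obtain ⟨hi1, hj1, he1⟩ := ih1
    obtain ⟨hi2, hj2, he2⟩ := ih2
    obtain ⟨hi3, hj3, he3⟩ := ih3
    have hp1 := pvDp_pos c (i+1) j
    have hp2 := pvDp_pos c i (j+1)
    have hp3 := pvDp_pos c i j
    rw [pvDp, if_pos hcond]
    obtain ⟨hAB, hBC, hCD⟩ := hcond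
    refine ⟨by omega, by omega, ?_⟩
    intro a b ha hb
    rcases Nat.eq_zero_or_pos a with ha0 | ha1
    · rcases Nat.eq_zero_or_pos b with hb0 | hb1
      · simp [ha0, hb0]
      · have := he1 0 (b-1) (by omega) (by omega)
        have e2 : j - (b-1) = (j+1) - b := by omega
        rw [e2] at this
        simp only [ha0, Nat.sub_zero] at this ⊢
        rw [this, hBC.symm, hAB.symm]
    · rcases Nat.eq_zero_or_pos b with hb0 | hb1
      · have := he2 (a-1) 0 (by omega) (by omega)
        have e2 : i - (a-1) = (i+1) - a := by omega
        rw [e2] at this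
        simp only [hb0, Nat.sub_zero] at this ⊢
        rw [this, hAB.symm]
      · have := he3 (a-1) (b-1) (by omega) (by omega)
        have e2 : i - (a-1) = (i+1) - a := by omega
        have e3 : j - (b-1) = (j+1) - b := by omega
        rw [e2, e3] at this
        rw [this, hCD.symm, hBC.symm, hAB.symm]
  | case4 i j hcond =>
    rw [pvDp, if_neg hcond]
    refine ⟨by omega, by omega, ?_⟩
    intro a b ha hb
    have ha' : a = 0 := by omega
    have hb' : b = 0 := by omega
    simp [ha', hb']

-- (b) the DP value dominates every constant square ending at (i, j)
theorem pvDp_ge (c : List (List Int)) (t : Nat) : ∀ i j : Nat, t ≤ i → t ≤ j →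
    pvEqto c i j t → t + 1 ≤ pvDp c i j := by
  induction t with
  | zero => intro i j _ _ _; exact pvDp_pos c i j
  | succ t ih =>
    intro i j hi hj h
    obtain ⟨i, rfl⟩ : ∃ i', i = i' + 1 := ⟨i - 1, by omega⟩
    obtain ⟨j, rfl⟩ : ∃ j', j = j' + 1 := ⟨j - 1, by omega⟩
    have hB := h 1 0 (by omega) (by omega)
    have hC := h 0 1 (by omega) (by omega)
    have hD := h 1 1 (by omega) (by omega)
    simp only [Nat.sub_zero, Nat.add_sub_cancel] at hB hC hD
    have hcond : pvG c (i+1) (j+1) = pvG c i (j+1) ∧ pvG c i (j+1) = pvG c (i+1) j ∧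
        pvG c (i+1) j = pvG c i j := by
      refine ⟨hB.symm, by rw [hB, hC], by rw [hC, hD]⟩
    rw [pvDp, if_pos hcond]
    have h1 : t + 1 ≤ pvDp c (i+1) j := by
      refine ih (i+1) j (by omega) (by omega) ?_
      intro a b ha hb
      have := h a (b+1) (by omega) (by omega)
      simp only [Nat.succ_sub_succ] at this
      rw [this, hC]
    have h2 : t + 1 ≤ pvDp c i (j+1) := by
      refine ih i (j+1) (by omega) (by omega) ?_
      intro a b ha hb
      have := h (a+1) b (by omega) (by omega)
      simp only [Nat.succ_sub_succ] at this
      rw [this, hB]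
    have h3 : t + 1 ≤ pvDp c i j := by
      refine ih i j (by omega) (by omega) ?_
      intro a b ha hb
      have := h (a+1) (b+1) (by omega) (by omega)
      simp only [Nat.succ_sub_succ] at this
      rw [this, hD]
    omega

theorem pvCond_iff (c : List (List Int)) (i j s : Nat) (hs : 1 ≤ s) :
    pvCond c i j s ↔ pvEqto c (i + (s - 1)) (j + (s - 1)) (s - 1) := by
  obtain ⟨u, rfl⟩ : ∃ u, s = u + 1 := ⟨s - 1, by omega⟩
  simp only [Nat.add_sub_cancel]
  constructor
  · intro h a b ha hb
    have h1 := h (u - a) (u - b) (by omega) (by omega)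
    have e1 : i + u - a = i + (u - a) := by omega
    have e2 : j + u - b = j + (u - b) := by omega
    have h2 := h u u (by omega) (by omega)
    rw [e1, e2, h1, h2]
  · intro h a b ha hb
    have h1 := h (u - a) (u - b) (by omega) (by omega)
    have e1 : i + u - (u - a) = i + a := by omega
    have e2 : j + u - (u - b) = j + b := by omega
    rw [e1, e2] at h1
    have h2 := h u u (by omega) (by omega)
    have e3 : i + u - u = i := by omega
    have e4 : j + u - u = j := by omega
    rw [e3, e4] at h2
    rw [h1, h2]

theorem pvMat_getD (c : List (List Int)) {n : Nat} (i k : Nat) {r : Nat} (hr : r < n) :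
    (pvMat c n i k).getD r [] =
      if r < i then pvRow c n r else if r = i then pvRow c k i else [] :=
  PySem.List.getD_map_range _ _ _ _ hr

theorem pvRow_getD (c : List (List Int)) {k : Nat} (i : Nat) {j : Nat} (hj : j < k) :
    (pvRow c k i).getD j 0 = (pvDp c i j : Int) :=
  PySem.List.getD_map_range _ _ _ _ hj

theorem pvRow_succ (c : List (List Int)) (k i : Nat) :
    pvRow c k i ++ [((pvDp c i k : Nat) : Int)] = pvRow c (k+1) i := by
  simp [pvRow, List.range_succ]

theorem pvMat_set (c : List (List Int)) {n : Nat} (i k : Nat) (hi : i < n) :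
    (pvMat c n i k).set i (pvRow c (k+1) i) = pvMat c n i (k+1) := by
  apply List.ext_getElem
  · simp [pvMat]
  · intro r h1 h2
    simp only [pvMat, List.length_set, List.length_map, List.length_range] at h1 h2 ⊢
    simp only [List.getElem_set, List.getElem_map, List.getElem_range]
    by_cases h : i = r
    · subst h; simp [hi]
    · rw [if_neg h]
      by_cases h2 : r < i
      · rw [if_pos h2, if_pos h2]
      · rw [if_neg h2, if_neg h2, if_neg (fun he => h he.symm), if_neg (fun he => h he.symm)]

theorem pvMat_succ (c : List (List Int)) (n i : Nat) :
    pvMat c n i n = pvMat c n (i+1) 0 := by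
  unfold pvMat
  apply List.map_congr_left
  intro r _
  by_cases h1 : r < i
  · rw [if_pos h1, if_pos (by omega)]
  · by_cases h2 : r = i
    · subst h2; rw [if_neg h1, if_pos rfl, if_pos (by omega)]
    · rw [if_neg h1, if_neg h2, if_neg (by omega)]
      by_cases h3 : r = i + 1
      · rw [if_pos h3]; simp [pvRow]
      · rw [if_neg h3]

-- the inner step of A's loop preserves the invariant
theorem pv_stepA (c : List (List Int)) {n : Nat} (m : Int) {i k : Nat}
    (hi : i < n) (hk : k < n) :
    pvBodyA c (pvMat c n i k, m) (i : Int) (k : Int) =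
      (pvMat c n i (k+1), max m ((pvDp c i k : Int))) := by
  have hgetrow : PySem.List.pyGetD (pvMat c n i k) (i : Int) [] = pvRow c k i := by
    rw [PySem.List.pyGetD_natCast, pvMat_getD c i k hi]
    simp
  have hv : (if (i : Int) = 0 ∨ (k : Int) = 0 then (1 : Int)
      else
        if PySem.List.pyGetD (PySem.List.pyGetD c (i : Int) []) (k : Int) 0
             = PySem.List.pyGetD (PySem.List.pyGetD c ((i : Int)-1) []) (k : Int) 0
           ∧ PySem.List.pyGetD (PySem.List.pyGetD c ((i : Int)-1) []) (k : Int) 0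
             = PySem.List.pyGetD (PySem.List.pyGetD c (i : Int) []) ((k : Int)-1) 0
           ∧ PySem.List.pyGetD (PySem.List.pyGetD c (i : Int) []) ((k : Int)-1) 0
             = PySem.List.pyGetD (PySem.List.pyGetD c ((i : Int)-1) []) ((k : Int)-1) 0 then
          min (min (PySem.List.pyGetD (PySem.List.pyGetD (pvMat c n i k) (i : Int) []) ((k : Int)-1) 0)
                   (PySem.List.pyGetD (PySem.List.pyGetD (pvMat c n i k) ((i : Int)-1) []) (k : Int) 0))
              (PySem.List.pyGetD (PySem.List.pyGetD (pvMat c n i k) ((i : Int)-1) []) ((k : Int)-1) 0) + 1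
        else 1) = (pvDp c i k : Int) := by
    by_cases h0 : i = 0 ∨ k = 0
    · rw [if_pos (by rcases h0 with h | h <;> [left; right] <;> simp [h])]
      rcases h0 with h | h <;> subst h
      · simp [pvDp]
      · rcases i with _ | i <;> simp [pvDp]
    · push_neg at h0
      obtain ⟨i, rfl⟩ : ∃ i', i = i' + 1 := ⟨i - 1, by omega⟩
      obtain ⟨k, rfl⟩ : ∃ k', k = k' + 1 := ⟨k - 1, by omega⟩
      rw [if_neg (by push_cast; omega)]
      have ei : ((i + 1 : Nat) : Int) - 1 = ((i : Nat) : Int) := by push_cast; omega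
      have ek : ((k + 1 : Nat) : Int) - 1 = ((k : Nat) : Int) := by push_cast; omega
      rw [ei, ek]
      rw [hgetrow]
      have hgetprev : PySem.List.pyGetD (pvMat c n (i+1) (k+1)) ((i : Nat) : Int) [] = pvRow c n i := by
        rw [PySem.List.pyGetD_natCast, pvMat_getD c (i+1) (k+1) (by omega)]
        rw [if_pos (by omega)]
      rw [hgetprev]
      simp only [PySem.List.pyGetD_natCast]
      rw [pvRow_getD c (i+1) (by omega), pvRow_getD c i (by omega), pvRow_getD c i (by omega)]
      rw [pvDp]
      simp only [pvG]
      split_ifs <;> push_cast <;> omega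
  simp only [pvBodyA]
  rw [hv, hgetrow]
  simp only [PySem.List.pySetD_natCast]
  rw [pvRow_succ, pvMat_set c i k hi]
  have hrd : PySem.List.pyGetD (PySem.List.pyGetD (pvMat c n i (k+1)) (i : Int) []) (k : Int) 0
      = (pvDp c i k : Int) := by
    simp only [PySem.List.pyGetD_natCast]
    rw [pvMat_getD c i (k+1) hi, if_neg (lt_irrefl i), if_pos rfl, pvRow_getD c i (by omega)]
  rw [hrd]

theorem pv_innerfold (c : List (List Int)) {n : Nat} (m : Int) {i : Nat} (hi : i < n) :
    ∀ k, k ≤ n → (List.range k).foldl (fun st (j : Nat) => pvBodyA c st (i : Int) (j : Int))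
        (pvMat c n i 0, m) = (pvMat c n i k, pvRowMax c m i k) := by
  intro k
  induction k with
  | zero => intro _; simp [pvRowMax]
  | succ k ih =>
    intro hk
    rw [List.range_succ, List.foldl_append, ih (by omega)]
    simp only [List.foldl_cons, List.foldl_nil]
    rw [pv_stepA c _ hi (by omega)]
    unfold pvRowMax
    rw [List.range_succ, List.foldl_append]
    simp

theorem pv_outerfold (c : List (List Int)) {n : Nat} :
    ∀ i, i ≤ n → (List.range i).foldl
        (fun st (iN : Nat) => (List.range n).foldl
          (fun st (j : Nat) => pvBodyA c st (iN : Int) (j : Int)) st)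
        (pvMat c n 0 0, (0 : Int)) = (pvMat c n i 0, pvAMax c n i) := by
  intro i
  induction i with
  | zero => intro _; simp [pvAMax]
  | succ i ih =>
    intro hii
    rw [List.range_succ, List.foldl_append, ih (by omega)]
    simp only [List.foldl_cons, List.foldl_nil]
    rw [pv_innerfold c _ (by omega) n le_rfl, pvMat_succ]
    unfold pvAMax
    rw [List.range_succ, List.foldl_append]
    simp only [List.foldl_cons, List.foldl_nil]

-- characterization of port A
theorem pv_findsize_eq (c : List (List Int)) (size : Int) :
    findsize c size = pvAMax c size.toNat size.toNat := by
  unfold findsize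
  simp only [PySem.List.pyRange_zero, PySem.List.foldl_append_singleton_eq_map,
    List.nil_append, List.foldl_map]
  have h0 : (List.range size.toNat).map (fun _ => ([] : List Int)) = pvMat c size.toNat 0 0 := by
    unfold pvMat
    apply List.map_congr_left
    intro r _
    by_cases h : r = 0
    · subst h; simp [pvRow]
    · simp [h]
  rw [h0, pv_outerfold c size.toNat le_rfl]

-- bounds on pvAMax
theorem pvDp_le_pvAMax (c : List (List Int)) {n r j : Nat} (hr : r < n) (hj : j < n) :
    (pvDp c r j : Int) ≤ pvAMax c n n := by
  unfold pvAMax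
  refine pv_foldl_ge_of_mem _ (fun a x => (PySem.List.le_foldl_max_int _ _ a).1)
    (List.mem_range.mpr hr) _ (fun a => ?_) 0
  exact (PySem.List.le_foldl_max_int (List.range n) (fun j => (pvDp c r j : Int)) a).2 _
    (List.mem_range.mpr hj)

theorem pvAMax_le (c : List (List Int)) (n : Nat) (B : Int)
    (hB : 0 ≤ B) (h : ∀ r j, r < n → j < n → (pvDp c r j : Int) ≤ B) :
    pvAMax c n n ≤ B := by
  unfold pvAMax
  refine pv_foldl_le_bound _ B (fun a r ha hr => ?_) hB
  unfold pvRowMax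
  refine pv_foldl_le_bound _ B (fun a' j ha' hj => ?_) ha
  exact max_le ha' (h r j (List.mem_range.mp hr) (List.mem_range.mp hj))

-- bridge between B's block test and pvCond
theorem pv_condB (c : List (List Int)) (iN jN : Nat) (s : Int) :
    (((PySem.List.pyRange 0 s).all (fun a => (PySem.List.pyRange 0 s).all (fun b =>
       PySem.List.pyGetD (PySem.List.pyGetD c ((iN : Int) + a) []) ((jN : Int) + b) 0
         == PySem.List.pyGetD (PySem.List.pyGetD c (iN : Int) []) (jN : Int) 0))) = true)
    ↔ pvCond c iN jN s.toNat := by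
  rw [PySem.List.pyRange_zero]
  simp only [List.all_map, List.all_eq_true, List.mem_range, Function.comp, beq_iff_eq,
    ← Nat.cast_add, PySem.List.pyGetD_natCast]
  unfold pvCond pvG
  exact ⟨fun h a b ha hb => h a ha b hb, fun h a ha b hb => h a b ha hb⟩

-- monotonicity / attainment / boundedness of B's innermost loop
theorem pvInnerB_ge (c : List (List Int)) (size : Int) (iN jN : Nat) :
    ∀ best, best ≤ pvInnerB c size iN jN best := by
  intro best
  unfold pvInnerB
  refine pv_foldl_ge_init _ (fun a x => ?_) _ best
  split_ifs <;> omega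

theorem pvInnerB_attain (c : List (List Int)) (size : Int) (iN jN : Nat) (s : Int)
    (hmem : s ∈ PySem.List.pyRange 2 (size+1))
    (hfit : (iN : Int) + s ≤ size ∧ (jN : Int) + s ≤ size)
    (hcond : pvCond c iN jN s.toNat) :
    ∀ best, s ≤ pvInnerB c size iN jN best := by
  intro best
  unfold pvInnerB
  refine pv_foldl_ge_of_mem _ (fun a x => by split_ifs <;> omega) hmem s (fun a => ?_) best
  rw [if_pos hfit, if_pos ((pv_condB c iN jN s).mpr hcond)]
  omega

theorem pvInnerB_le (c : List (List Int)) (size : Int) (iN jN : Nat) (B : Int)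
    (hB : ∀ s : Int, 2 ≤ s → s ≤ size → (iN : Int) + s ≤ size → (jN : Int) + s ≤ size →
      pvCond c iN jN s.toNat → s ≤ B) :
    ∀ best, best ≤ B → pvInnerB c size iN jN best ≤ B := by
  intro best hbest
  unfold pvInnerB
  refine pv_foldl_le_bound _ B (fun a s ha hs => ?_) hbest
  have hmem := PySem.List.mem_pyRange_one.mp hs
  split_ifs with h1 h2
  · exact max_le ha (hB s (by omega) (by omega) h1.1 h1.2 ((pv_condB c iN jN s).mp h2))
  · exact ha
  · exact ha

-- characterization of port B (positive size)
theorem pv_altB (c : List (List Int)) (size : Int) (h : 0 < size) :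
    findsize_alt c size = (List.range size.toNat).foldl
      (fun best iN => (List.range size.toNat).foldl
        (fun best jN => pvInnerB c size iN jN best) best) 1 := by
  unfold findsize_alt pvInnerB
  rw [if_neg (by omega)]
  simp only [PySem.List.pyRange_zero, List.foldl_map]

-- the two programs agree everywhere
theorem pv_main (c : List (List Int)) (size : Int) :
    findsize c size = findsize_alt c size := by
  by_cases h : size ≤ 0
  · rw [pv_findsize_eq]
    have h0 : size.toNat = 0 := by omega
    rw [h0]
    unfold findsize_alt
    rw [if_pos h]
    simp [pvAMax]
  · have h' : 0 < size := by omega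
    have hn1 : 1 ≤ size.toNat := by omega
    have hcast : ((size.toNat : Nat) : Int) = size := by omega
    rw [pv_findsize_eq, pv_altB c size h']
    set n := size.toNat with hn
    have hBstep : ∀ (a : Int) (x : Nat), a ≤ (List.range n).foldl
        (fun best jN => pvInnerB c size x jN best) a := by
      intro a x
      exact pv_foldl_ge_init _ (fun a' y => pvInnerB_ge c size x y a') _ a
    apply le_antisymm
    · -- DP maximum ≤ brute-force result
      apply pvAMax_le
      · exact le_trans (by omega) (pv_foldl_ge_init _ hBstep _ 1)
      · intro r j hr hj
        obtain ⟨h1, h2, h3⟩ := pvDp_eqto c r j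
        have hpos := pvDp_pos c r j
        set t := pvDp c r j - 1 with ht
        rcases Nat.eq_zero_or_pos t with ht0 | ht1
        · have hdp : (pvDp c r j : Int) = 1 := by omega
          rw [hdp]
          exact pv_foldl_ge_init _ hBstep _ 1
        · have hdp : (pvDp c r j : Int) = ((t : Nat) : Int) + 1 := by
            push_cast; omega
          rw [hdp]
          refine pv_foldl_ge_of_mem _ hBstep (List.mem_range.mpr (show r - t < n by omega))
            _ (fun a => ?_) 1
          refine pv_foldl_ge_of_mem _ (fun a' y => pvInnerB_ge c size (r-t) y a')
            (List.mem_range.mpr (show j - t < n by omega)) _ (fun a' => ?_) a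
          have hs : ((t : Nat) : Int) + 1 = (((t + 1 : Nat) : Nat) : Int) := by push_cast; ring
          rw [hs]
          refine pvInnerB_attain c size (r-t) (j-t) _ ?_ ?_ ?_ a'
          · rw [PySem.List.mem_pyRange_one]
            constructor
            · push_cast; omega
            · push_cast; omega
          · constructor
            · push_cast; omega
            · push_cast; omega
          · rw [Int.toNat_natCast]
            rw [pvCond_iff c (r-t) (j-t) (t+1) (by omega)]
            simp only [Nat.add_sub_cancel]
            have e1 : r - t + t = r := by omega
            have e2 : j - t + t = j := by omega
            rw [e1, e2]
            exact h3
    · -- brute-force result ≤ DP maximum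
      have hinit : (1 : Int) ≤ pvAMax c n n := by
        have h00 : (pvDp c 0 0 : Int) ≤ pvAMax c n n :=
          pvDp_le_pvAMax c (by omega) (by omega)
        simpa [pvDp] using h00
      refine pv_foldl_le_bound _ _ (fun a iN ha hiN => ?_) hinit
      refine pv_foldl_le_bound _ _ (fun a' jN ha' hjN => ?_) ha
      refine pvInnerB_le c size iN jN _ (fun s hs2 hssize hfi hfj hcond => ?_) a' ha'
      have hiN' : iN < n := List.mem_range.mp hiN
      have hjN' : jN < n := List.mem_range.mp hjN
      set sN := s.toNat with hsN
      have hsN2 : 2 ≤ sN := by omega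
      have hE := (pvCond_iff c iN jN sN (by omega)).mp hcond
      have hge := pvDp_ge c (sN - 1) (iN + (sN - 1)) (jN + (sN - 1)) (by omega) (by omega) hE
      have hle := pvDp_le_pvAMax c (n := n) (show iN + (sN - 1) < n by omega)
        (show jN + (sN - 1) < n by omega)
      omega

-- ===== VERDICT (by name: the statement is the Claim_ definition above) =====
theorem findsize_spec : Claim_equal_findsize := by
  intro contour size _ _
  unfold Spec_findsize
  exact pv_main contour size
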